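-- pv_equiv track=rewrite | github.com/Lucas-brb/Modelisation | plan_transport_1h.py | plus_petite_longueur
-- ===== SOURCE A (Python) =====
-- def plus_petite_longueur(l):
--     """
--     """
--     longueurs = []
--     index = []
--     for elt in l :
--         longueurs.append(len(elt))
--     long_min = min(longueurs)
--     for _ in range(len(l)):
--         if longueurs[_] == long_min:
--             index.append(_)
--     return index
-- ===== SOURCE B (Python) =====
-- def plus_petite_longueur(l):
--     min_len = None
--     index = []
--     for i, elt in enumerate(l):
--         ln = len(elt)
--         if min_len is None or ln < min_len:
--             min_len = ln
--             index = [i]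
--         elif ln == min_len:
--             index.append(i)
--     return index
-- ===== Notes on version B (the rewrite author's own statement) =====
-- stated objective: simpler
-- what changed: Single enumerate pass maintaining the running minimum length and its index list, instead of building a lengths list, taking min(), and re-scanning by index.
-- outside the precondition, e.g. on plus_petite_longueur([]): A raises ValueError, B returns []
import Mathlib
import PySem

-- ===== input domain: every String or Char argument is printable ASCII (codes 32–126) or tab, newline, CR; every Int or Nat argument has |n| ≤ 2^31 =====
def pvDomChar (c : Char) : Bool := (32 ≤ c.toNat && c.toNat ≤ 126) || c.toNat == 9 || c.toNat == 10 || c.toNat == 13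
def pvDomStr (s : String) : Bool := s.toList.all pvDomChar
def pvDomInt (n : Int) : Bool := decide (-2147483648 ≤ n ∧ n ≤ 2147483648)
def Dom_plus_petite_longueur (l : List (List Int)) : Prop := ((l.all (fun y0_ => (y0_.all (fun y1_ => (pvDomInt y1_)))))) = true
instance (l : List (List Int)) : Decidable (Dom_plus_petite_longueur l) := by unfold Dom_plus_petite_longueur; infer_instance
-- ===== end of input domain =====

-- B replaces A's three passes (lengths list, min(), index re-scan) by one enumerate pass
-- keeping the running minimum and its index list; return-value equivalence on nonempty lists.


-- ===== PORT A =====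
def plus_petite_longueur (l : List (List Int)) : List Int :=
  let longueurs := l.foldl (fun acc elt => acc ++ [(elt.length : Int)]) []
  match PySem.List.min? longueurs (fun x => x) with
  | none => []  -- Python raises ValueError here (l = []); excluded by Pre_
  | some long_min =>
    (PySem.List.pyRange 0 (l.length : Int) 1).foldl
      (fun idx i => if PySem.List.pyGetD longueurs i 0 = long_min then idx ++ [i] else idx) []

-- ===== PORT B =====
-- one step of B's loop body: state = (min_len, index)
def pplAltStep (s : Option Int × List Int) (p : Int × List Int) : Option Int × List Int :=
  let ln : Int := p.2.length
  match s.1 with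
  | none => (some ln, [p.1])
  | some m =>
    if ln < m then (some ln, [p.1])
    else if ln = m then (some m, s.2 ++ [p.1])
    else s

def plus_petite_longueur_alt (l : List (List Int)) : List Int :=
  ((PySem.List.enumerate l 0).foldl pplAltStep (none, [])).2

-- ===== PRECONDITION & SPEC =====
-- Pre_ excludes only the empty list, where Python's min([]) raises ValueError.
def Pre_plus_petite_longueur (l : List (List Int)) : Prop := l ≠ []
instance (l : List (List Int)) : Decidable (Pre_plus_petite_longueur l) := by
  unfold Pre_plus_petite_longueur; infer_instance

def pvWitness_plus_petite_longueur : List (List Int) := [[1, 2], [3], [4]]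

def Spec_plus_petite_longueur (l : List (List Int)) (out : List Int) : Prop :=
  out = plus_petite_longueur_alt l
instance (l : List (List Int)) (out : List Int) : Decidable (Spec_plus_petite_longueur l out) := by
  unfold Spec_plus_petite_longueur; infer_instance

-- ===== CLAIM (what is proved, stated in full; the proofs are below) =====
def Claim_equal_plus_petite_longueur : Prop :=
  ∀ (l : List (List Int)), Dom_plus_petite_longueur l → Pre_plus_petite_longueur l →
    Spec_plus_petite_longueur l (plus_petite_longueur l)

-- ===== LEMMAS AND PROOFS =====

-- lengths of the elements, as Ints
def pplLens (l : List (List Int)) : List Int := l.map (fun e => (e.length : Int))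

-- running minimum of the lengths (meaningful for l ≠ [])
def pplM : List (List Int) → Int
  | [] => 0
  | x :: xs => (pplLens xs).foldl min (x.length : Int)

-- reference result: first components of the enumerate pairs whose element has minimal length
def pplRef (l : List (List Int)) (m : Int) : List Int :=
  ((PySem.List.enumerate l 0).filter (fun p => decide ((p.2.length : Int) = m))).map (·.1)

theorem pplM_min? (x : List Int) (xs : List (List Int)) :
    PySem.List.min? (pplLens (x :: xs)) (fun y => y) = some (pplM (x :: xs)) := by
  simp [pplLens, pplM, PySem.List.min?_id_cons]

theorem pplM_le (l : List (List Int)) (hl : l ≠ []) :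
    ∀ e ∈ l, pplM l ≤ (e.length : Int) := by
  obtain ⟨x, xs, rfl⟩ := List.exists_cons_of_ne_nil hl
  intro e he
  have hmem : ((e.length : Int)) ∈ pplLens (x :: xs) :=
    List.mem_map.mpr ⟨e, he, rfl⟩
  have := PySem.List.min?_isMin (pplM_min? x xs) ((e.length : Int)) hmem
  simpa using this

theorem pplM_append (xs : List (List Int)) (x : List Int) (hxs : xs ≠ []) :
    pplM (xs ++ [x]) = min (pplM xs) (x.length : Int) := by
  obtain ⟨y, ys, rfl⟩ := List.exists_cons_of_ne_nil hxs
  simp [pplM, pplLens, List.foldl_append]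

theorem pplRef_append (xs : List (List Int)) (x : List Int) (m : Int) :
    pplRef (xs ++ [x]) m =
      pplRef xs m ++ (if (x.length : Int) = m then [(xs.length : Int)] else []) := by
  by_cases h : (x.length : Int) = m <;>
    simp [pplRef, PySem.List.enumerate_append, PySem.List.enumerate_cons,
      PySem.List.enumerate_nil, List.filter_append, h]

-- if m is strictly below every length in xs, the reference list is empty
theorem pplRef_empty (xs : List (List Int)) (m : Int)
    (h : ∀ e ∈ xs, m < (e.length : Int)) : pplRef xs m = [] := by
  simp only [pplRef, List.map_eq_nil_iff, List.filter_eq_nil_iff]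
  intro p hp hpm
  rw [PySem.List.mem_enumerate_iff] at hp
  obtain ⟨k, hk, rfl⟩ := hp
  have := h xs[k] (List.getElem_mem hk)
  simp at hpm
  omega

-- B characterization
theorem alt_fold (l : List (List Int)) (hl : l ≠ []) :
    (PySem.List.enumerate l 0).foldl pplAltStep (none, []) =
      (some (pplM l), pplRef l (pplM l)) := by
  induction l using List.reverseRecOn with
  | nil => exact absurd rfl hl
  | append_singleton xs x ih =>
    rcases eq_or_ne xs [] with rfl | hxs
    · simp [PySem.List.enumerate_cons, pplAltStep, pplM, pplLens, pplRef,
        PySem.List.enumerate_nil]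
    · rw [PySem.List.enumerate_append, List.foldl_append, ih hxs]
      simp only [PySem.List.enumerate_nil, PySem.List.enumerate_cons, List.foldl_cons,
        List.foldl_nil]
      rw [pplM_append xs x hxs, pplRef_append]
      unfold pplAltStep
      simp only []
      rcases lt_trichotomy ((x.length : Int)) (pplM xs) with hlt | heq | hgt
      · rw [if_pos hlt]
        have hm : min (pplM xs) (x.length : Int) = (x.length : Int) := by omega
        rw [hm]
        have : pplRef xs (x.length : Int) = [] := by
          apply pplRef_empty
          intro e he
          exact lt_of_lt_of_le hlt (pplM_le xs hxs e he)
        simp [this]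
      · rw [if_neg (by omega), if_pos heq]
        have hm : min (pplM xs) (x.length : Int) = pplM xs := by omega
        rw [hm]
        simp [heq]
      · rw [if_neg (by omega), if_neg (by omega)]
        have hm : min (pplM xs) (x.length : Int) = pplM xs := by omega
        rw [hm]
        simp [show ¬ ((x.length : Int) = pplM xs) by omega]

-- A characterization
theorem a_eq_ref (l : List (List Int)) (hl : l ≠ []) :
    plus_petite_longueur l = pplRef l (pplM l) := by
  obtain ⟨x, xs, rfl⟩ := List.exists_cons_of_ne_nil hl
  have hlong : (x :: xs).foldl (fun acc elt => acc ++ [(elt.length : Int)]) [] =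
      pplLens (x :: xs) := by
    simpa [pplLens] using
      PySem.List.foldl_append_singleton_eq_map (fun e : List Int => (e.length : Int))
        (x :: xs) []
  simp only [plus_petite_longueur, hlong, pplM_min? x xs]
  rw [PySem.List.foldl_append_ite_eq_filter]
  rw [pplRef, PySem.List.enumerate_eq_map_pyRange (x :: xs) ([] : List Int)]
  rw [List.filter_map, List.map_map]
  have hget : ∀ i : Int, PySem.List.pyGetD (pplLens (x :: xs)) i 0 =
      ((PySem.List.pyGetD (x :: xs) i []).length : Int) := by
    intro i
    simpa [pplLens] using
      PySem.List.pyGetD_map (fun e : List Int => (e.length : Int)) (x :: xs) i []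
  simp [Function.comp_def, hget, PySem.List.len]

-- ===== VERDICT (by name: the statement is the Claim_ definition above) =====
theorem plus_petite_longueur_spec : Claim_equal_plus_petite_longueur := by
  intro l _ hpre
  unfold Spec_plus_petite_longueur plus_petite_longueur_alt
  rw [alt_fold l hpre, a_eq_ref l hpre]
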